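-- pv_equiv track=rewrite | github.com/kacperklusek/ASD | colesseum/z1_k1_2019.py | check_prettiness
-- ===== SOURCE A (Python) =====
-- def check_prettiness(num):
--     nums = [0 for i in range(10)]
--     soles, multiples = 0, 0
--     while num != 0:
--         if nums[num % 10] == 0:  # liczba wystepuje raz to dodajemy do soles
--             nums[num % 10] = 1
--             soles += 1
--         elif nums[num % 10] == 1:  # jak wystepuje kolejny raz to dodajemy do multiples i odejmujemy od soles
--             nums[num % 10] = 2
--             multiples += 1
--             soles -= 1
--         num //= 10
--     return soles, multiples
-- ===== SOURCE B (Python) =====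
-- def check_prettiness(num):
--     counts = [0] * 10
--     while num != 0:
--         counts[num % 10] += 1
--         num //= 10
--     soles = sum(1 for c in counts if c == 1)
--     multiples = sum(1 for c in counts if c >= 2)
--     return soles, multiples
-- ===== Notes on version B (the rewrite author's own statement) =====
-- stated objective: simpler
-- what changed: A fuses digit extraction with an incremental 0/1/2 state machine that adjusts soles/multiples on the fly; B first counts all digit occurrences into a frequency table in one plain loop, then classifies in a separate pass (soles = digits with count 1, multiples = digits with count >= 2).
import Mathlib
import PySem

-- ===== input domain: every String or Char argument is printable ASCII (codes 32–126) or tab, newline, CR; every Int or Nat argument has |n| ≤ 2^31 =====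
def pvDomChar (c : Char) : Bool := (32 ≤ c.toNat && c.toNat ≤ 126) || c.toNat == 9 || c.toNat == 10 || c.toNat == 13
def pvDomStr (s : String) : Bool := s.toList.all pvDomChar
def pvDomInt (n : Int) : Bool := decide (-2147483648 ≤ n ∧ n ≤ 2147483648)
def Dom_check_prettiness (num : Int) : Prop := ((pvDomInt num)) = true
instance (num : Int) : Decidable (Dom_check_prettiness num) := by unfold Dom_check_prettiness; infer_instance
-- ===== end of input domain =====

-- B counts digit occurrences first, then classifies in a second pass; A fuses both. Equivalence proved for 0 ≤ num (A's loop does not terminate on negatives).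

-- ===== PORT A =====
-- the 'num ≤ 0' guard only makes the recursion total: for 0 ≤ num it coincides with Python's 'num != 0'
def check_prettiness_loop (num : Int) (nums : List Int) (soles multiples : Int) : Int × Int :=
  if h : num ≤ 0 then (soles, multiples)
  else
    let d := PySem.Int.mod num 10
    let v := PySem.List.pyGetD nums d 0
    if v = 0 then
      check_prettiness_loop (PySem.Int.floordiv num 10) (PySem.List.pySetD nums d 1) (soles + 1) multiples
    else if v = 1 then
      check_prettiness_loop (PySem.Int.floordiv num 10) (PySem.List.pySetD nums d 2) (soles - 1) (multiples + 1)
    else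
      check_prettiness_loop (PySem.Int.floordiv num 10) nums soles multiples
termination_by num.toNat
decreasing_by all_goals (rw [PySem.Int.floordiv_eq_ediv_of_pos (by omega)]; omega)

def check_prettiness (num : Int) : Int × Int :=
  check_prettiness_loop num ((PySem.List.pyRange 0 10 1).map (fun _ => 0)) 0 0

-- ===== PORT B =====
def check_prettiness_alt_count (num : Int) (counts : List Int) : List Int :=
  if h : num ≤ 0 then counts
  else
    check_prettiness_alt_count (PySem.Int.floordiv num 10)
      (PySem.List.pySetD counts (PySem.Int.mod num 10)
        (PySem.List.pyGetD counts (PySem.Int.mod num 10) 0 + 1))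
termination_by num.toNat
decreasing_by rw [PySem.Int.floordiv_eq_ediv_of_pos (by omega)]; omega

def check_prettiness_alt (num : Int) : Int × Int :=
  let counts := check_prettiness_alt_count num (List.replicate 10 0)
  (counts.foldl (fun acc c => if c = 1 then acc + 1 else acc) 0,
   counts.foldl (fun acc c => if 2 ≤ c then acc + 1 else acc) 0)

-- ===== PRECONDITION & SPEC =====
-- Pre_ excludes negative num: there Python A's 'num //= 10' loop never reaches 0 and A diverges (B likewise).
def Pre_check_prettiness (num : Int) : Prop := 0 ≤ num
instance (num : Int) : Decidable (Pre_check_prettiness num) := by unfold Pre_check_prettiness; infer_instance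
def pvWitness_check_prettiness : Int := 112233

def Spec_check_prettiness (num : Int) (out : Int × Int) : Prop := out = check_prettiness_alt num
instance (num : Int) (out : Int × Int) : Decidable (Spec_check_prettiness num out) := by unfold Spec_check_prettiness; infer_instance

-- ===== CLAIM (what is proved, stated in full; the proofs are below) =====
def Claim_equal_check_prettiness : Prop := ∀ (num : Int), Dom_check_prettiness num → Pre_check_prettiness num → Spec_check_prettiness num (check_prettiness num)

-- ===== LEMMAS AND PROOFS =====

def pvClassify (cs : List Int) : Int × Int :=
  (cs.foldl (fun acc c => if c = 1 then acc + 1 else acc) 0,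
   cs.foldl (fun acc c => if 2 ≤ c then acc + 1 else acc) 0)

def pvCnt1 (l : List Int) : Int := (l.countP (fun c => decide (c = 1)) : Int)
def pvCnt2 (l : List Int) : Int := (l.countP (fun c => decide (2 ≤ c)) : Int)

lemma pv_countP_set {α : Type} (p : α → Bool) (l : List α) (n : Nat) (h : n < l.length) (x : α) :
    (((l.set n x).countP p : Nat) : Int)
      = (l.countP p : Int) - (if p l[n] then 1 else 0) + (if p x then 1 else 0) := by
  induction l generalizing n with
  | nil => simp at h
  | cons a t ih =>
    cases n with
    | zero =>
      simp only [List.set_cons_zero, List.countP_cons, List.getElem_cons_zero]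
      push_cast
      split_ifs <;> omega
    | succ m =>
      have hm : m < t.length := by simpa using h
      simp only [List.set_cons_succ, List.countP_cons, List.getElem_cons_succ]
      have := ih m hm
      split_ifs at * <;> push_cast at * <;> omega

lemma pv_set_getElem_self (l : List Int) (n : Nat) (h : n < l.length) :
    l.set n l[n] = l := by
  apply List.ext_getElem (by simp)
  intro i h1 h2
  rw [List.getElem_set]
  split <;> simp_all

lemma pv_loop_eq : ∀ (k : Nat) (num : Int), num.toNat = k → ∀ (counts : List Int),
    counts.length = 10 → (∀ c ∈ counts, 0 ≤ c) →
    check_prettiness_loop num (counts.map (fun c => min c 2)) (pvCnt1 counts) (pvCnt2 counts)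
      = pvClassify (check_prettiness_alt_count num counts) := by
  intro k
  induction k using Nat.strong_induction_on with
  | _ k ih =>
    intro num hk counts hlen hnn
    by_cases hle : num ≤ 0
    · rw [check_prettiness_loop, check_prettiness_alt_count]
      simp only [dif_pos hle]
      unfold pvClassify
      rw [PySem.List.foldl_ite_add_one, PySem.List.foldl_ite_add_one]
      simp [pvCnt1, pvCnt2]
    · have hd0 : (0:Int) ≤ PySem.Int.mod num 10 := PySem.Int.mod_nonneg num (by norm_num)
      have hd9 : PySem.Int.mod num 10 < 10 := PySem.Int.mod_lt num (by norm_num)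
      set d : Int := PySem.Int.mod num 10 with hd
      have hn : d.toNat < counts.length := by omega
      set n : Nat := d.toNat with hndef
      have hcmem : counts[n] ∈ counts := List.getElem_mem hn
      set c : Int := counts[n] with hcdef
      have hc0 : 0 ≤ c := hnn _ hcmem
      have hgetB : PySem.List.pyGetD counts d 0 = c := by
        rw [PySem.List.pyGetD_eq_getElem counts 0 hd0 (by omega)]
      have hgetA : PySem.List.pyGetD (counts.map (fun c => min c 2)) d 0 = min c 2 := by
        rw [PySem.List.pyGetD_eq_getElem _ 0 hd0 (by simp; omega)]
        rw [List.getElem_map, ← hcdef]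
      have hsetB : PySem.List.pySetD counts d (PySem.List.pyGetD counts d 0 + 1)
          = counts.set n (c + 1) := by
        rw [hgetB, PySem.List.pySetD_of_nonneg _ _ hd0]
      have hnum' : (PySem.Int.floordiv num 10).toNat < k := by
        rw [PySem.Int.floordiv_eq_ediv_of_pos (by omega)]; omega
      have hlen' : (counts.set n (c + 1)).length = 10 := by simp [hlen]
      have hnn' : ∀ x ∈ counts.set n (c + 1), 0 ≤ x := by
        intro y hy
        rcases List.mem_or_eq_of_mem_set hy with h | h
        · exact hnn _ h
        · omega
      have hrec := ih _ hnum' (PySem.Int.floordiv num 10) rfl (counts.set n (c + 1)) hlen' hnn'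
      have hmap : (counts.set n (c + 1)).map (fun c => min c 2)
          = (counts.map (fun c => min c 2)).set n (min (c + 1) 2) := by
        simp [List.map_set]
      rw [check_prettiness_loop, check_prettiness_alt_count]
      simp only [dif_neg hle]
      rw [hsetB, hrec.symm, hgetA]
      have hcnt1 := pv_countP_set (fun c => decide (c = 1)) counts n hn (c + 1)
      have hcnt2 := pv_countP_set (fun c => decide (2 ≤ c)) counts n hn (c + 1)
      rw [← hcdef] at hcnt1 hcnt2
      rcases (by omega : c = 0 ∨ c = 1 ∨ 2 ≤ c) with hc | hc | hc
      · -- first occurrence of this digit: A adds to soles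
        rw [if_pos (by omega : min c 2 = 0)]
        have a1 : PySem.List.pySetD (counts.map (fun c => min c 2)) d 1
            = (counts.set n (c + 1)).map (fun c => min c 2) := by
          rw [PySem.List.pySetD_of_nonneg _ _ hd0, hmap, show min (c + 1) 2 = 1 by omega]
        have a2 : pvCnt1 counts + 1 = pvCnt1 (counts.set n (c + 1)) := by
          simp only [pvCnt1]; rw [hcnt1]; simp [hc]
        have a3 : pvCnt2 counts = pvCnt2 (counts.set n (c + 1)) := by
          simp only [pvCnt2]; rw [hcnt2]; simp [hc]
        rw [a1, a2, a3]
      · -- second occurrence: A moves it from soles to multiples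
        rw [if_neg (by omega : ¬ min c 2 = 0), if_pos (by omega : min c 2 = 1)]
        have a1 : PySem.List.pySetD (counts.map (fun c => min c 2)) d 2
            = (counts.set n (c + 1)).map (fun c => min c 2) := by
          rw [PySem.List.pySetD_of_nonneg _ _ hd0, hmap, show min (c + 1) 2 = 2 by omega]
        have a2 : pvCnt1 counts - 1 = pvCnt1 (counts.set n (c + 1)) := by
          simp only [pvCnt1]; rw [hcnt1]; simp [hc]
        have a3 : pvCnt2 counts + 1 = pvCnt2 (counts.set n (c + 1)) := by
          simp only [pvCnt2]; rw [hcnt2]; simp [hc]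
        rw [a1, a2, a3]
      · -- third or later occurrence: A changes nothing
        rw [if_neg (by omega : ¬ min c 2 = 0), if_neg (by omega : ¬ min c 2 = 1)]
        have a1 : counts.map (fun c => min c 2)
            = (counts.set n (c + 1)).map (fun c => min c 2) := by
          rw [hmap]
          have hv : min (c + 1) 2 = (counts.map (fun c => min c 2))[n]'(by simpa using hn) := by
            rw [List.getElem_map, ← hcdef]; omega
          rw [hv, pv_set_getElem_self]
        have a2 : pvCnt1 counts = pvCnt1 (counts.set n (c + 1)) := by
          simp only [pvCnt1]; rw [hcnt1]
          have h1 : ¬ (c = 1) := by omega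
          have h2 : ¬ (c + 1 = 1) := by omega
          simp [h1, h2]
        have a3 : pvCnt2 counts = pvCnt2 (counts.set n (c + 1)) := by
          simp only [pvCnt2]; rw [hcnt2]
          have h1 : (2:Int) ≤ c := hc
          have h2 : (2:Int) ≤ c + 1 := by omega
          simp [h1, h2]
        rw [a1, a2, a3]

-- ===== VERDICT (by name: the statement is the Claim_ definition above) =====

theorem check_prettiness_spec : Claim_equal_check_prettiness := by
  intro num _ hpre
  unfold Spec_check_prettiness check_prettiness check_prettiness_alt
  have h0 : ((PySem.List.pyRange 0 10 1).map (fun _ => (0:Int)))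
      = (List.replicate 10 (0:Int)).map (fun c => min c 2) := by decide
  have h1 : (0:Int) = pvCnt1 (List.replicate 10 0) := by decide
  have h2 : (0:Int) = pvCnt2 (List.replicate 10 0) := by decide
  rw [h0]
  conv_lhs => rw [h1, h2]
  exact pv_loop_eq num.toNat num rfl (List.replicate 10 0) (by decide) (by decide)
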